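-- pv_equiv track=rewrite | github.com/logxdx/deadly_python | py-codes/list_single_drop.py | Check_single_drop
-- ===== SOURCE A (Python) =====
-- def Check_single_drop(L):
--     i=0
--     l=len(L)
--     while i<l-2:
--         if L[i]<L[i+1]:
--             for j in range(i,l-1):
--                 if L[j]>L[j+1]:
--                     return False
--         i+=1
--
--     else:
--         return True
-- ===== SOURCE B (Python) =====
-- def Check_single_drop(L):
--     ascent_seen = False
--     for a, b in zip(L, L[1:]):
--         if a < b:
--             ascent_seen = True
--         elif ascent_seen and a > b:
--             return False
--     return True
-- ===== Notes on version B (the rewrite author's own statement) =====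
-- stated objective: faster
-- what changed: Replaces A's quadratic rescan-for-a-descent after every ascent by one linear pass over adjacent pairs carrying an 'ascent seen' flag.
import Mathlib
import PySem

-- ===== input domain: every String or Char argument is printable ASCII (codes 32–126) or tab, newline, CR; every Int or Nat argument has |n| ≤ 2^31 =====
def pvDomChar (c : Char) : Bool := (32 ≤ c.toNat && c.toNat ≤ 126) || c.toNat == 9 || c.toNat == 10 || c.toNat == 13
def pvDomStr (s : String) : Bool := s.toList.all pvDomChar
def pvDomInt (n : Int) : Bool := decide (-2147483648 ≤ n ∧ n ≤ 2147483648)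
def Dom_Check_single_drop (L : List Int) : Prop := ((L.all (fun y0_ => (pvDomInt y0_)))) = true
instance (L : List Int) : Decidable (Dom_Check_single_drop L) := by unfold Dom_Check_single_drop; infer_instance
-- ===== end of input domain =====

-- B replaces A's quadratic rescan-after-every-ascent by one linear pass over adjacent
-- pairs with an "ascent seen" flag (objective: faster).

-- ===== PORT A =====
-- inner 'for j in range(i, l-1): if L[j] > L[j+1]: return False' — returns true iff a
-- descent is found; fuel bounds the loop, the guard 'j + 1 < L.length' is 'j < l-1'.
-- All Python indexing here uses nonnegative in-range indices, so List.getD is exact.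
def csdInner (L : List Int) : Nat → Nat → Bool
  | 0, _ => false
  | fuel + 1, j =>
    if j + 1 < L.length then
      if L.getD j 0 > L.getD (j + 1) 0 then true else csdInner L fuel (j + 1)
    else false

-- outer 'while i < l-2'; falling out of the while (or fuel, which is never exhausted
-- under the guard) hits the 'else: return True'.
def csdOuter (L : List Int) : Nat → Nat → Bool
  | 0, _ => true
  | fuel + 1, i =>
    if i + 2 < L.length then
      if L.getD i 0 < L.getD (i + 1) 0 then
        if csdInner L (L.length - 1 - i) i then false else csdOuter L fuel (i + 1)
      else csdOuter L fuel (i + 1)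
    else true

def Check_single_drop (L : List Int) : Bool := csdOuter L L.length 0

-- ===== PORT B =====
-- 'for a, b in zip(L, L[1:])' = structural recursion over adjacent pairs, carrying
-- the ascent_seen flag; branch order as in Source B.
def csdScan : List Int → Bool → Bool
  | a :: b :: rest, asc =>
    if a < b then csdScan (b :: rest) true
    else if asc ∧ a > b then false
    else csdScan (b :: rest) asc
  | _, _ => true

def Check_single_drop_alt (L : List Int) : Bool := csdScan L false

-- ===== PRECONDITION & SPEC =====
def Spec_Check_single_drop (L : List Int) (out : Bool) : Prop := out = Check_single_drop_alt L
instance (L : List Int) (out : Bool) : Decidable (Spec_Check_single_drop L out) := by unfold Spec_Check_single_drop; infer_instance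

-- ===== CLAIM (what is proved, stated in full; the proofs are below) =====
def Claim_equal_Check_single_drop : Prop := ∀ (L : List Int), Dom_Check_single_drop L → Spec_Check_single_drop L (Check_single_drop L)

-- ===== LEMMAS AND PROOFS =====

-- descent at index j
def CsdDesc (L : List Int) (j : Nat) : Prop := j + 1 < L.length ∧ L.getD j 0 > L.getD (j + 1) 0
-- ascent at index k with k ≤ l-3 (A's outer-loop bound)
def CsdAsc (L : List Int) (k : Nat) : Prop := k + 2 < L.length ∧ L.getD k 0 < L.getD (k + 1) 0
-- ascent at index k (any adjacent pair)
def CsdAsc' (L : List Int) (k : Nat) : Prop := k + 1 < L.length ∧ L.getD k 0 < L.getD (k + 1) 0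

theorem csdInner_iff (L : List Int) (fuel j : Nat) (h : L.length ≤ j + fuel + 1) :
    csdInner L fuel j = true ↔ ∃ m, j ≤ m ∧ CsdDesc L m := by
  induction fuel generalizing j with
  | zero =>
    simp only [csdInner]
    constructor
    · intro hc; exact absurd hc (by simp)
    · rintro ⟨m, hm, hd, _⟩; omega
  | succ f ih =>
    simp only [csdInner]
    split_ifs with h1 h2
    · constructor
      · intro _; exact ⟨j, le_refl _, h1, h2⟩
      · intro _; rfl
    · rw [ih (j + 1) (by omega)]
      constructor
      · rintro ⟨m, hm, hd⟩; exact ⟨m, by omega, hd⟩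
      · rintro ⟨m, hm, hd⟩
        refine ⟨m, ?_, hd⟩
        rcases Nat.eq_or_lt_of_le hm with rfl | hlt
        · exact absurd hd.2 (by omega)
        · omega
    · constructor
      · intro hc; exact absurd hc (by simp)
      · rintro ⟨m, hm, hd, _⟩; omega

theorem csdOuter_iff (L : List Int) (fuel i : Nat) (h : L.length ≤ i + fuel + 2) :
    csdOuter L fuel i = true ↔ ¬ ∃ k, i ≤ k ∧ CsdAsc L k ∧ ∃ m, k ≤ m ∧ CsdDesc L m := by
  induction fuel generalizing i with
  | zero =>
    simp only [csdOuter, true_iff]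
    rintro ⟨k, hk, ⟨hk2, _⟩, _⟩; omega
  | succ f ih =>
    simp only [csdOuter]
    split_ifs with h1 h2 h3
    · simp only [Bool.false_eq_true, false_iff, not_not]
      exact ⟨i, le_refl _, ⟨h1, h2⟩, (csdInner_iff L _ i (by omega)).mp h3⟩
    · rw [ih (i + 1) (by omega)]
      constructor
      · rintro hno ⟨k, hk, ha, hm⟩
        rcases Nat.eq_or_lt_of_le hk with rfl | hlt
        · exact h3 ((csdInner_iff L _ i (by omega)).mpr hm)
        · exact hno ⟨k, by omega, ha, hm⟩
      · rintro hno ⟨k, hk, ha, hm⟩; exact hno ⟨k, by omega, ha, hm⟩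
    · rw [ih (i + 1) (by omega)]
      constructor
      · rintro hno ⟨k, hk, ha, hm⟩
        rcases Nat.eq_or_lt_of_le hk with rfl | hlt
        · exact h2 ha.2
        · exact hno ⟨k, by omega, ha, hm⟩
      · rintro hno ⟨k, hk, ha, hm⟩; exact hno ⟨k, by omega, ha, hm⟩
    · simp only [true_iff]
      rintro ⟨k, hk, ⟨hk2, _⟩, _⟩; omega

theorem csdScan_iff (L : List Int) (asc : Bool) :
    csdScan L asc = true ↔
      ¬ ∃ m, CsdDesc L m ∧ (asc = true ∨ ∃ k, k ≤ m ∧ CsdAsc' L k) := by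
  induction L generalizing asc with
  | nil =>
    simp only [csdScan, true_iff]
    rintro ⟨m, ⟨hm, _⟩, _⟩; simp at hm
  | cons a t ih =>
    cases t with
    | nil =>
      simp only [csdScan, true_iff]
      rintro ⟨m, ⟨hm, _⟩, _⟩; simp at hm
    | cons b rest =>
      have hshiftD : ∀ m, CsdDesc (a :: b :: rest) (m + 1) ↔ CsdDesc (b :: rest) m := by
        intro m; unfold CsdDesc; simp [List.getD_cons_succ]
      have hshiftA : ∀ k, CsdAsc' (a :: b :: rest) (k + 1) ↔ CsdAsc' (b :: rest) k := by
        intro k; unfold CsdAsc'; simp [List.getD_cons_succ]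
      have hD0 : CsdDesc (a :: b :: rest) 0 ↔ a > b := by
        unfold CsdDesc; simp
      have hA0 : CsdAsc' (a :: b :: rest) 0 ↔ a < b := by
        unfold CsdAsc'; simp
      simp only [csdScan]
      split_ifs with h1 h2
      · -- a < b : flag becomes true
        rw [ih true]
        constructor
        · rintro hno ⟨m, hd, _⟩
          cases m with
          | zero => exact absurd (hD0.mp hd) (by omega)
          | succ m => exact hno ⟨m, (hshiftD m).mp hd, Or.inl rfl⟩
        · rintro hno ⟨m, hd, _⟩
          exact hno ⟨m + 1, (hshiftD m).mpr hd, Or.inr ⟨0, by omega, hA0.mpr h1⟩⟩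
      · -- descent with flag set: False
        simp only [Bool.false_eq_true, false_iff, not_not]
        exact ⟨0, hD0.mpr h2.2, Or.inl h2.1⟩
      · -- no ascent at 0, no firing descent: recurse with same flag
        rw [ih asc]
        constructor
        · rintro hno ⟨m, hd, hw⟩
          cases m with
          | zero =>
            have hab : a > b := hD0.mp hd
            rcases hw with hasc | ⟨k, hk, hka⟩
            · exact h2 ⟨hasc, hab⟩
            · interval_cases k
              exact absurd (hA0.mp hka) (by omega)
          | succ m =>
            refine hno ⟨m, (hshiftD m).mp hd, ?_⟩
            rcases hw with hasc | ⟨k, hk, hka⟩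
            · exact Or.inl hasc
            · cases k with
              | zero => exact absurd (hA0.mp hka) h1
              | succ k => exact Or.inr ⟨k, by omega, (hshiftA k).mp hka⟩
        · rintro hno ⟨m, hd, hw⟩
          refine hno ⟨m + 1, (hshiftD m).mpr hd, ?_⟩
          rcases hw with hasc | ⟨k, hk, hka⟩
          · exact Or.inl hasc
          · exact Or.inr ⟨k + 1, by omega, (hshiftA k).mpr hka⟩

-- ===== VERDICT (by name: the statement is the Claim_ definition above) =====
theorem Check_single_drop_spec : Claim_equal_Check_single_drop := by
  intro L _
  unfold Spec_Check_single_drop Check_single_drop Check_single_drop_alt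
  rw [Bool.eq_iff_iff]
  rw [csdOuter_iff L L.length 0 (by omega), csdScan_iff L false]
  constructor
  · -- no (ascent ≤ l-3 followed by descent)  ⇒  no (descent with earlier-or-equal ascent)
    intro hno ⟨m, hd, hw⟩
    rcases hw with hfalse | ⟨k, hk, hka⟩
    · exact absurd hfalse (by simp)
    · -- an ascent at k ≤ m with a descent at m forces k + 2 < l : if k + 1 = l - 1
      -- then m = k and the pair would be both an ascent and a descent.
      have hk2 : k + 2 < L.length := by
        rcases Nat.lt_or_ge (k + 2) L.length with h | h
        · exact h
        · have : m = k := by rcases hd with ⟨hm1, _⟩; rcases hka with ⟨hk1, _⟩; omega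
          subst this; rcases hd with ⟨_, h1⟩; rcases hka with ⟨_, h2⟩; omega
      exact hno ⟨k, Nat.zero_le _, ⟨hk2, hka.2⟩, m, hk, hd⟩
  · rintro hno ⟨k, -, hka, m, hk2, hd⟩
    have hk1 := hka.1
    exact hno ⟨m, hd, Or.inr ⟨k, hk2, ⟨by omega, hka.2⟩⟩⟩
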